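-- pv_equiv track=rewrite | github.com/ut2310/memory_management_take_home | src/knowledge_graph_service.py | _classify_op
-- ===== SOURCE A (Python) =====
-- from typing import Dict, List, Optional, Tuple, Any, Set
--
-- def _classify_op(action_type: str, action: Dict[str, Any]) -> str:
--     """
--     'write' if likely to mutate, else 'read'.
--     """
--     if action_type in {"create_file", "modify_code", "delete_file"}:
--         return "write"
--     if action_type == "execute_command":
--         cmd = (action.get("command") or "").lower()
--         write_markers = [
--             " create-", " put-", " attach-", " update-", " delete-",
--             " remove-", " set-", " cp ", " mv ", " rm ",
--         ]
--         if any(m in f" {cmd} " for m in write_markers):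
--             return "write"
--     return "read"
-- ===== SOURCE B (Python) =====
-- _WRITE_CMDS = ("cp", "mv", "rm")
-- _WRITE_PREFIXES = ("create-", "put-", "attach-", "update-", "delete-",
--                    "remove-", "set-")
--
--
-- def _is_write_word(word):
--     return word in _WRITE_CMDS or word.startswith(_WRITE_PREFIXES)
--
--
-- def _scan_words(cmd):
--     # streaming scan: peel off one space-delimited word at a time
--     while True:
--         word, sep, rest = cmd.partition(" ")
--         if _is_write_word(word):
--             return True
--         if not sep:
--             return False
--         cmd = rest
--
--
-- def _classify_op(action_type, action):
--     """
--     'write' if likely to mutate, else 'read'.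
--     """
--     if action_type in ("create_file", "modify_code", "delete_file"):
--         return "write"
--     if action_type != "execute_command":
--         return "read"
--     cmd = action.get("command", "").lower()
--     return "write" if _scan_words(cmd) else "read"
-- ===== Notes on version B (the rewrite author's own statement) =====
-- stated objective: alternative
-- what changed: Instead of padding the command with spaces and running a substring scan for each of ten space-decorated markers, B streams through the command with str.partition, peeling off one space-delimited word at a time and classifying each word against exact command names (cp/mv/rm) and hyphen prefixes via startswith.
import Mathlib
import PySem

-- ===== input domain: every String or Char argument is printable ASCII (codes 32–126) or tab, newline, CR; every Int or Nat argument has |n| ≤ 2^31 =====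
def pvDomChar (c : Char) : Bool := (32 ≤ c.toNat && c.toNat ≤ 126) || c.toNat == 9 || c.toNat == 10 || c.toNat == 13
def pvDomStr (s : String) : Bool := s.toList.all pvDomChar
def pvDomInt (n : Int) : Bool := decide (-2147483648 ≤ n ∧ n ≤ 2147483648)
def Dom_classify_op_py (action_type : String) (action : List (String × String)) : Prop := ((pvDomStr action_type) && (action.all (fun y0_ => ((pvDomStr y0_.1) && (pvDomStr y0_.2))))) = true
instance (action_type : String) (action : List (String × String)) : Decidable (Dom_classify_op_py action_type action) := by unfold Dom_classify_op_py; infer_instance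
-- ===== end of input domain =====

-- B streams through the command one space-delimited word at a time (partition-style recursion) and classifies each word against exact names (cp/mv/rm) and hyphen prefixes, instead of A's per-marker substring scan over the space-padded command; same result, proved equal on Dom.


-- ===== PORT A =====
def classify_op_py (action_type : String) (action : List (String × String)) : String :=
  if action_type = "create_file" ∨ action_type = "modify_code" ∨ action_type = "delete_file" then
    "write"
  else if action_type = "execute_command" then
    -- cmd = (action.get("command") or "").lower()
    let cmd := PySem.Chars.lower
      (match PySem.Dict.get? (PySem.Dict.mk action) "command" with
       | some s => if s = "" then "" else s
       | none => "").toList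
    let write_markers : List (List Char) :=
      [" create-".toList, " put-".toList, " attach-".toList, " update-".toList, " delete-".toList,
       " remove-".toList, " set-".toList, " cp ".toList, " mv ".toList, " rm ".toList]
    if write_markers.any (fun m => PySem.Chars.isIn m (' ' :: cmd ++ [' '])) then "write"
    else "read"
  else "read"

-- ===== PORT B =====
-- _is_write_word: exact command names or hyphen prefixes
def pvWriteWord (w : List Char) : Bool :=
  w == "cp".toList || w == "mv".toList || w == "rm".toList ||
  ["create-".toList, "put-".toList, "attach-".toList, "update-".toList, "delete-".toList,
   "remove-".toList, "set-".toList].any (fun p => PySem.Chars.startswith w p)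

-- _scan_words: cmd.partition(" ") gives (takeWhile (≠' '), rest after the first space);
-- recurse on the rest while a separator was found
def pvScanWords (cmd : List Char) : Bool :=
  if pvWriteWord (cmd.takeWhile (fun c => c ≠ ' ')) then true
  else
    match h : cmd.dropWhile (fun c => c ≠ ' ') with
    | [] => false          -- no separator: last word checked
    | _ :: rest => pvScanWords rest
termination_by cmd.length
decreasing_by
  have h1 : (cmd.dropWhile (fun c => c ≠ ' ')).length ≤ cmd.length :=
    List.length_dropWhile_le _ _
  rw [h] at h1
  simpa using Nat.lt_of_lt_of_le (Nat.lt_succ_self _) (by simpa using h1)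

def classify_op_py_alt (action_type : String) (action : List (String × String)) : String :=
  if action_type = "create_file" ∨ action_type = "modify_code" ∨ action_type = "delete_file" then
    "write"
  else if action_type ≠ "execute_command" then "read"
  else
    let cmd := PySem.Chars.lower (PySem.Dict.getD (PySem.Dict.mk action) "command" "").toList
    if pvScanWords cmd then "write" else "read"

-- ===== PRECONDITION & SPEC =====
def Spec_classify_op_py (action_type : String) (action : List (String × String)) (out : String) : Prop := out = classify_op_py_alt action_type action
instance (action_type : String) (action : List (String × String)) (out : String) : Decidable (Spec_classify_op_py action_type action out) := by unfold Spec_classify_op_py; infer_instance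

-- ===== CLAIM (what is proved, stated in full; the proofs are below) =====
def Claim_equal_classify_op_py : Prop := ∀ (action_type : String) (action : List (String × String)), Dom_classify_op_py action_type action → Spec_classify_op_py action_type action (classify_op_py action_type action)

-- ===== LEMMAS AND PROOFS =====

-- abstract model of splitting on single spaces, with the current word as accumulator
def pvSplitSp : List Char → List Char → List (List Char)
  | [], w => [w]
  | c :: rest, w => if c = ' ' then w :: pvSplitSp rest [] else pvSplitSp rest (w ++ [c])

-- pvScanWords is any pvWriteWord over the split words
lemma pvSplitSp_head : ∀ (cs w : List Char),
    pvSplitSp cs w = (w ++ cs.takeWhile (fun c => c ≠ ' ')) ::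
      (match cs.dropWhile (fun c => c ≠ ' ') with
       | [] => []
       | _ :: rest => pvSplitSp rest []) := by
  intro cs
  induction cs with
  | nil => intro w; simp [pvSplitSp]
  | cons c rest ih =>
    intro w
    by_cases hc : c = ' '
    · subst hc; simp [pvSplitSp]
    · simp only [pvSplitSp, hc, if_false, List.takeWhile_cons, List.dropWhile_cons,
        decide_eq_true_eq, ih (w ++ [c])]
      simp [hc]

lemma pvScanWords_eq : ∀ (cs : List Char),
    pvScanWords cs = (pvSplitSp cs []).any pvWriteWord := by
  intro cs
  induction cs using pvScanWords.induct with
  | case1 cmd hw =>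
    rw [pvScanWords, if_pos hw, pvSplitSp_head]
    simp only [ne_eq, decide_not] at hw
    simp [hw]
  | case2 cmd hw h =>
    rw [pvScanWords, if_neg hw, pvSplitSp_head, h]
    simp only [ne_eq, decide_not] at hw
    simp [hw]
  | case3 cmd hw c rest h ih =>
    rw [pvScanWords, if_neg hw, pvSplitSp_head, h]
    simp only [ne_eq, decide_not] at hw
    simp [hw, ih]

-- the space-padded command is the split words joined with single spaces, padded
def pvPadJoin : List (List Char) → List Char
  | [] => [' ']
  | u :: us => ' ' :: u ++ pvPadJoin us

lemma pvPadJoin_splitSp : ∀ (l w : List Char), pvPadJoin (pvSplitSp l w) = ' ' :: w ++ l ++ [' '] := by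
  intro l
  induction l with
  | nil => intro w; simp [pvSplitSp, pvPadJoin]
  | cons c rest ih =>
    intro w
    by_cases hc : c = ' '
    · subst hc; simp [pvSplitSp, pvPadJoin, ih]
    · simp [pvSplitSp, hc, ih]

lemma pvSplitSp_no_space : ∀ (l w u : List Char), (' ' ∉ w) → u ∈ pvSplitSp l w → ' ' ∉ u := by
  intro l
  induction l with
  | nil => intro w u hw hu; simp [pvSplitSp] at hu; subst hu; exact hw
  | cons c rest ih =>
    intro w u hw hu
    by_cases hc : c = ' '
    · subst hc
      simp [pvSplitSp] at hu
      rcases hu with h | h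
      · subst h; exact hw
      · exact ih [] u (by simp) h
    · simp [pvSplitSp, hc] at hu
      refine ih (w ++ [c]) u ?_ hu
      intro hmem
      rcases List.mem_append.mp hmem with h | h
      · exact hw h
      · simp at h; exact hc h.symm

lemma pvPadJoin_head : ∀ (ws : List (List Char)), ∃ t, pvPadJoin ws = ' ' :: t := by
  intro ws; cases ws with
  | nil => exact ⟨[], rfl⟩
  | cons u us => exact ⟨u ++ pvPadJoin us, rfl⟩

-- a space-free prefix of u ++ P (P starting with a space) is a prefix of u
lemma pvPrefixSplit : ∀ (q u P : List Char), ' ' ∉ q → P.head? = some ' ' →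
    q <+: u ++ P → q <+: u := by
  intro q
  induction q with
  | nil => intro u P _ _ _; exact List.nil_prefix
  | cons a q' ih =>
    intro u P hq hP hpre
    cases u with
    | nil =>
      exfalso
      cases P with
      | nil => simp at hP
      | cons p P' =>
        simp at hP
        rcases List.cons_prefix_cons.mp (by simpa using hpre) with ⟨ha, _⟩
        exact hq (by simp [ha, hP])
    | cons b u' =>
      rcases List.cons_prefix_cons.mp (by simpa using hpre) with ⟨ha, htail⟩
      subst ha
      have := ih u' P (fun h => hq (List.mem_cons_of_mem _ h)) hP htail
      exact List.cons_prefix_cons.mpr ⟨rfl, this⟩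

-- q ++ [' '] a prefix of u ++ P with q, u space-free and P starting with a space forces q = u
lemma pvWordSplit : ∀ (q u P : List Char), ' ' ∉ q → ' ' ∉ u → P.head? = some ' ' →
    q ++ [' '] <+: u ++ P → q = u := by
  intro q
  induction q with
  | nil =>
    intro u P _ hu hP hpre
    cases u with
    | nil => rfl
    | cons b u' =>
      exfalso
      have hpre' : (' ' :: ([] : List Char)) <+: b :: (u' ++ P) := by simpa using hpre
      rcases List.cons_prefix_cons.mp hpre' with ⟨hb, -⟩
      exact hu (List.mem_cons.mpr (Or.inl hb))
  | cons a q' ih =>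
    intro u P hq hu hP hpre
    cases u with
    | nil =>
      exfalso
      cases P with
      | nil => simp at hP
      | cons p P' =>
        simp at hP
        rcases List.cons_prefix_cons.mp (by simpa using hpre) with ⟨ha, _⟩
        exact hq (by simp [ha, hP])
    | cons b u' =>
      rcases List.cons_prefix_cons.mp (by simpa using hpre) with ⟨ha, htail⟩
      subst ha
      have := ih u' P (fun h => hq (List.mem_cons_of_mem _ h)) (fun h => hu (List.mem_cons_of_mem _ h)) hP htail
      simp [this]

-- an infix starting with ' ' cannot start inside a space-free word
lemma pvInfixSkipWord : ∀ (u P q : List Char), ' ' ∉ u →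
    (' ' :: q) <:+: u ++ P → (' ' :: q) <:+: P := by
  intro u
  induction u with
  | nil => intro P q _ h; simpa using h
  | cons b u' ih =>
    intro P q hu h
    rcases List.infix_cons_iff.mp (by simpa using h) with hpre | hinf
    · exfalso
      rcases List.cons_prefix_cons.mp hpre with ⟨hb, -⟩
      exact hu (List.mem_cons.mpr (Or.inl hb))
    · exact ih P q (fun hh => hu (List.mem_cons_of_mem _ hh)) hinf

lemma pvPrefixMarker : ∀ (ws : List (List Char)) (q : List Char), q ≠ [] → ' ' ∉ q →
    (∀ u ∈ ws, ' ' ∉ u) →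
    ((' ' :: q) <:+: pvPadJoin ws ↔ ∃ u ∈ ws, q <+: u) := by
  intro ws
  induction ws with
  | nil =>
    intro q hq _ _
    simp only [pvPadJoin, List.not_mem_nil]
    constructor
    · intro h
      exfalso
      rcases List.infix_cons_iff.mp (show (' ' :: q) <:+: ' ' :: ([] : List Char) from h) with hpre | hinf
      · exact hq (List.prefix_nil.mp (List.cons_prefix_cons.mp hpre).2)
      · exact absurd (List.infix_nil.mp hinf) (by simp)
    · rintro ⟨u, hu, -⟩; exact absurd hu (by simp)
  | cons u us ih =>
    intro q hq hsp hws
    have hu := hws u (List.mem_cons_self)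
    have hus : ∀ v ∈ us, ' ' ∉ v := fun v hv => hws v (List.mem_cons_of_mem _ hv)
    obtain ⟨t, ht⟩ := pvPadJoin_head us
    constructor
    · intro h
      rcases List.infix_cons_iff.mp (by simpa [pvPadJoin] using h) with hpre | hinf
      · have : q <+: u ++ pvPadJoin us := (List.cons_prefix_cons.mp hpre).2
        exact ⟨u, List.mem_cons_self, pvPrefixSplit q u (pvPadJoin us) hsp (by simp [ht]) this⟩
      · have := (ih q hq hsp hus).mp (pvInfixSkipWord u (pvPadJoin us) q hu hinf)
        rcases this with ⟨v, hv, hp⟩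
        exact ⟨v, List.mem_cons_of_mem _ hv, hp⟩
    · rintro ⟨v, hv, hp⟩
      rcases List.mem_cons.mp hv with rfl | hv'
      · have hpre : (' ' :: q) <+: pvPadJoin (v :: us) := by
          show (' ' :: q) <+: ' ' :: (v ++ pvPadJoin us)
          exact List.cons_prefix_cons.mpr ⟨rfl, hp.trans (List.prefix_append _ _)⟩
        exact hpre.isInfix
      · have hrec := (ih q hq hsp hus).mpr ⟨v, hv', hp⟩
        have hsfx : pvPadJoin us <:+ pvPadJoin (u :: us) := by
          show pvPadJoin us <:+ ' ' :: (u ++ pvPadJoin us)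
          exact (List.suffix_append u _).trans (List.suffix_cons ' ' _)
        exact hrec.trans hsfx.isInfix

lemma pvWordMarker : ∀ (ws : List (List Char)) (q : List Char), ' ' ∉ q →
    (∀ u ∈ ws, ' ' ∉ u) →
    ((' ' :: q ++ [' ']) <:+: pvPadJoin ws ↔ q ∈ ws) := by
  intro ws
  induction ws with
  | nil =>
    intro q _ _
    simp only [pvPadJoin, List.not_mem_nil, iff_false]
    intro h
    rcases List.infix_cons_iff.mp (show (' ' :: (q ++ [' '])) <:+: ' ' :: ([] : List Char) from h) with hpre | hinf
    · have := List.prefix_nil.mp (List.cons_prefix_cons.mp hpre).2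
      simp at this
    · exact absurd (List.infix_nil.mp hinf) (by simp)
  | cons u us ih =>
    intro q hsp hws
    have hu := hws u (List.mem_cons_self)
    have hus : ∀ v ∈ us, ' ' ∉ v := fun v hv => hws v (List.mem_cons_of_mem _ hv)
    obtain ⟨t, ht⟩ := pvPadJoin_head us
    constructor
    · intro h
      rcases List.infix_cons_iff.mp (by simpa [pvPadJoin] using h) with hpre | hinf
      · have hp2 : q ++ [' '] <+: u ++ pvPadJoin us := by simpa using hpre
        exact (pvWordSplit q u (pvPadJoin us) hsp hu (by simp [ht]) hp2) ▸ List.mem_cons_self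
      · have hinf' : (' ' :: (q ++ [' '])) <:+: u ++ pvPadJoin us := hinf
        have := pvInfixSkipWord u (pvPadJoin us) (q ++ [' ']) hu hinf'
        exact List.mem_cons_of_mem _ ((ih q hsp hus).mp this)
    · intro hv
      rcases List.mem_cons.mp hv with rfl | hv'
      · refine ⟨[], t, ?_⟩
        simp [pvPadJoin, ht]
      · have hrec := (ih q hsp hus).mpr hv'
        have hsfx : pvPadJoin us <:+ pvPadJoin (u :: us) := by
          show pvPadJoin us <:+ ' ' :: (u ++ pvPadJoin us)
          exact (List.suffix_append u _).trans (List.suffix_cons ' ' _)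
        exact hrec.trans hsfx.isInfix

-- the two inner conditions agree on every command string
set_option maxHeartbeats 2000000 in
lemma pvCond (l : List Char) :
    ([" create-".toList, " put-".toList, " attach-".toList, " update-".toList, " delete-".toList,
      " remove-".toList, " set-".toList, " cp ".toList, " mv ".toList, " rm ".toList].any
        (fun m => PySem.Chars.isIn m (' ' :: l ++ [' ']))) =
    pvScanWords l := by
  have hnosp : ∀ u ∈ pvSplitSp l [], ' ' ∉ u := fun u hu => pvSplitSp_no_space l [] u (by simp) hu
  have hpad : pvPadJoin (pvSplitSp l []) = ' ' :: l ++ [' '] := by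
    simpa using pvPadJoin_splitSp l []
  rw [pvScanWords_eq]
  apply Bool.eq_iff_iff.mpr
  simp only [List.any_eq_true, List.mem_cons, List.not_mem_nil, or_false,
    PySem.Chars.isIn_iff_infix, pvWriteWord, Bool.or_eq_true, beq_iff_eq,
    PySem.Chars.startswith_iff]
  constructor
  · rintro ⟨m, hm, hinf⟩
    rw [← hpad] at hinf
    have HP : ∀ q : List Char, q ≠ [] → ' ' ∉ q →
        (' ' :: q) <:+: pvPadJoin (pvSplitSp l []) → ∃ u ∈ pvSplitSp l [], q <+: u :=
      fun q h1 h2 hi => (pvPrefixMarker _ q h1 h2 hnosp).mp hi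
    have HW : ∀ q : List Char, ' ' ∉ q →
        (' ' :: q ++ [' ']) <:+: pvPadJoin (pvSplitSp l []) → q ∈ pvSplitSp l [] :=
      fun q h1 hi => (pvWordMarker _ q h1 hnosp).mp hi
    rcases hm with rfl | rfl | rfl | rfl | rfl | rfl | rfl | rfl | rfl | rfl
    · rw [show " create-".toList = ' ' :: "create-".toList by decide] at hinf
      rcases HP _ (by decide) (by decide) hinf with ⟨u, hu, hp⟩
      exact ⟨u, hu, Or.inr ⟨"create-".toList, Or.inl rfl, hp⟩⟩
    · rw [show " put-".toList = ' ' :: "put-".toList by decide] at hinf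
      rcases HP _ (by decide) (by decide) hinf with ⟨u, hu, hp⟩
      exact ⟨u, hu, Or.inr ⟨"put-".toList, Or.inr (Or.inl rfl), hp⟩⟩
    · rw [show " attach-".toList = ' ' :: "attach-".toList by decide] at hinf
      rcases HP _ (by decide) (by decide) hinf with ⟨u, hu, hp⟩
      exact ⟨u, hu, Or.inr ⟨"attach-".toList, Or.inr (Or.inr (Or.inl rfl)), hp⟩⟩
    · rw [show " update-".toList = ' ' :: "update-".toList by decide] at hinf
      rcases HP _ (by decide) (by decide) hinf with ⟨u, hu, hp⟩
      exact ⟨u, hu, Or.inr ⟨"update-".toList, Or.inr (Or.inr (Or.inr (Or.inl rfl))), hp⟩⟩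
    · rw [show " delete-".toList = ' ' :: "delete-".toList by decide] at hinf
      rcases HP _ (by decide) (by decide) hinf with ⟨u, hu, hp⟩
      exact ⟨u, hu, Or.inr ⟨"delete-".toList, Or.inr (Or.inr (Or.inr (Or.inr (Or.inl rfl)))), hp⟩⟩
    · rw [show " remove-".toList = ' ' :: "remove-".toList by decide] at hinf
      rcases HP _ (by decide) (by decide) hinf with ⟨u, hu, hp⟩
      exact ⟨u, hu, Or.inr ⟨"remove-".toList, Or.inr (Or.inr (Or.inr (Or.inr (Or.inr (Or.inl rfl))))), hp⟩⟩
    · rw [show " set-".toList = ' ' :: "set-".toList by decide] at hinf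
      rcases HP _ (by decide) (by decide) hinf with ⟨u, hu, hp⟩
      exact ⟨u, hu, Or.inr ⟨"set-".toList, Or.inr (Or.inr (Or.inr (Or.inr (Or.inr (Or.inr (rfl)))))), hp⟩⟩
    · rw [show " cp ".toList = ' ' :: "cp".toList ++ [' '] by decide] at hinf
      exact ⟨"cp".toList, HW _ (by decide) hinf, Or.inl (Or.inl (Or.inl rfl))⟩
    · rw [show " mv ".toList = ' ' :: "mv".toList ++ [' '] by decide] at hinf
      exact ⟨"mv".toList, HW _ (by decide) hinf, Or.inl (Or.inl (Or.inr rfl))⟩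
    · rw [show " rm ".toList = ' ' :: "rm".toList ++ [' '] by decide] at hinf
      exact ⟨"rm".toList, HW _ (by decide) hinf, Or.inl (Or.inr rfl)⟩
  · rintro ⟨w, hw, hcase⟩
    rw [← hpad]
    rcases hcase with ((rfl | rfl) | rfl) | ⟨p, hp, hpre⟩
    · refine ⟨" cp ".toList, Or.inr (Or.inr (Or.inr (Or.inr (Or.inr (Or.inr (Or.inr (Or.inl rfl))))))), ?_⟩
      rw [show " cp ".toList = ' ' :: "cp".toList ++ [' '] by decide]
      exact (pvWordMarker _ _ (by decide) hnosp).mpr hw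
    · refine ⟨" mv ".toList, Or.inr (Or.inr (Or.inr (Or.inr (Or.inr (Or.inr (Or.inr (Or.inr (Or.inl rfl)))))))), ?_⟩
      rw [show " mv ".toList = ' ' :: "mv".toList ++ [' '] by decide]
      exact (pvWordMarker _ _ (by decide) hnosp).mpr hw
    · refine ⟨" rm ".toList, Or.inr (Or.inr (Or.inr (Or.inr (Or.inr (Or.inr (Or.inr (Or.inr (Or.inr (rfl))))))))), ?_⟩
      rw [show " rm ".toList = ' ' :: "rm".toList ++ [' '] by decide]
      exact (pvWordMarker _ _ (by decide) hnosp).mpr hw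
    · rcases hp with rfl | rfl | rfl | rfl | rfl | rfl | rfl
      · refine ⟨" create-".toList, Or.inl rfl, ?_⟩
        rw [show " create-".toList = ' ' :: "create-".toList by decide]
        exact (pvPrefixMarker _ _ (by decide) (by decide) hnosp).mpr ⟨w, hw, hpre⟩
      · refine ⟨" put-".toList, Or.inr (Or.inl rfl), ?_⟩
        rw [show " put-".toList = ' ' :: "put-".toList by decide]
        exact (pvPrefixMarker _ _ (by decide) (by decide) hnosp).mpr ⟨w, hw, hpre⟩
      · refine ⟨" attach-".toList, Or.inr (Or.inr (Or.inl rfl)), ?_⟩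
        rw [show " attach-".toList = ' ' :: "attach-".toList by decide]
        exact (pvPrefixMarker _ _ (by decide) (by decide) hnosp).mpr ⟨w, hw, hpre⟩
      · refine ⟨" update-".toList, Or.inr (Or.inr (Or.inr (Or.inl rfl))), ?_⟩
        rw [show " update-".toList = ' ' :: "update-".toList by decide]
        exact (pvPrefixMarker _ _ (by decide) (by decide) hnosp).mpr ⟨w, hw, hpre⟩
      · refine ⟨" delete-".toList, Or.inr (Or.inr (Or.inr (Or.inr (Or.inl rfl)))), ?_⟩
        rw [show " delete-".toList = ' ' :: "delete-".toList by decide]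
        exact (pvPrefixMarker _ _ (by decide) (by decide) hnosp).mpr ⟨w, hw, hpre⟩
      · refine ⟨" remove-".toList, Or.inr (Or.inr (Or.inr (Or.inr (Or.inr (Or.inl rfl))))), ?_⟩
        rw [show " remove-".toList = ' ' :: "remove-".toList by decide]
        exact (pvPrefixMarker _ _ (by decide) (by decide) hnosp).mpr ⟨w, hw, hpre⟩
      · refine ⟨" set-".toList, Or.inr (Or.inr (Or.inr (Or.inr (Or.inr (Or.inr (Or.inl rfl)))))), ?_⟩
        rw [show " set-".toList = ' ' :: "set-".toList by decide]
        exact (pvPrefixMarker _ _ (by decide) (by decide) hnosp).mpr ⟨w, hw, hpre⟩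

-- A's cmd expression ((get or "") with the or collapsing "" to "") equals B's getD
lemma pvCmd_eq (action : List (String × String)) :
    (match PySem.Dict.get? (PySem.Dict.mk action) "command" with
     | some s => if s = "" then "" else s
     | none => "") = PySem.Dict.getD (PySem.Dict.mk action) "command" "" := by
  rw [PySem.Dict.getD]
  cases PySem.Dict.get? (PySem.Dict.mk action) "command" with
  | none => rfl
  | some s => by_cases h : s = "" <;> simp [h]

-- ===== VERDICT (by name: the statement is the Claim_ definition above) =====
theorem classify_op_py_spec : Claim_equal_classify_op_py := by
  intro action_type action _
  unfold Spec_classify_op_py classify_op_py classify_op_py_alt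
  by_cases h1 : action_type = "create_file" ∨ action_type = "modify_code" ∨ action_type = "delete_file"
  · simp [h1]
  · by_cases h2 : action_type = "execute_command"
    · simp only [if_false, h2, if_true, ne_eq, not_true_eq_false]
      rw [pvCmd_eq, pvCond]
    · simp [h1, h2]
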